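-- pv_equiv track=rewrite | github.com/pandada-99/polySchool_py | MyPractice/MidTerm_220427.py | solution_4_1
-- ===== SOURCE A (Python) =====
-- def solution_4_1(orisinal):
--     count = orisinal.count(orisinal[0])
--     max = count
--     min = count
--
--     for i in range(1, len(orisinal)):
--         a = orisinal.count(orisinal[i])
--         if a > max:
--             max = a
--         elif a < min:
--             min = a
--     result = int(max / min)
--     return result
-- ===== SOURCE B (Python) =====
-- def solution_4_1(orisinal):
--     freq = {}
--     for x in orisinal:
--         freq[x] = freq.get(x, 0) + 1
--     counts = list(freq.values())
--     return max(counts) // min(counts)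
-- ===== Notes on version B (the rewrite author's own statement) =====
-- stated objective: faster
-- what changed: B builds a frequency dictionary in one pass and takes max//min of its values, instead of calling list.count once per position (a nested scan) and tracking a running max/min with an if/elif chain.
import Mathlib
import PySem

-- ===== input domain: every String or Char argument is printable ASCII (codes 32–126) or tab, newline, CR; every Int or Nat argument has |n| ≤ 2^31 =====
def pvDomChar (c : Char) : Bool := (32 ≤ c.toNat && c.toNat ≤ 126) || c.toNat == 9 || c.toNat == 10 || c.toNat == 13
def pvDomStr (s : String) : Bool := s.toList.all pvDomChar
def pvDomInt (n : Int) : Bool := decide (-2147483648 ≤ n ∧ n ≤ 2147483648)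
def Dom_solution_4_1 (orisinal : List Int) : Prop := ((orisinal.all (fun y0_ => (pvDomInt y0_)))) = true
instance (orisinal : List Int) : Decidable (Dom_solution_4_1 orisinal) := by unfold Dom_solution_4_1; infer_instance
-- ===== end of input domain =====

-- B replaces A's per-position list.count scans by a single frequency-dictionary pass (faster); equivalence is about the return value.

-- ===== PORT A =====
-- int(max/min) is ported as PySem.Int.truncdiv (exact for these magnitudes: counts are bounded by the list length)
def solution_4_1 (orisinal : List Int) : Int :=
  let count : Int := (orisinal.count (PySem.List.pyGetD orisinal 0 0) : Int)
  let s :=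
    (PySem.List.pyRange 1 (PySem.List.len orisinal)).foldl
      (fun (s : Int × Int) i =>
        let a : Int := (orisinal.count (PySem.List.pyGetD orisinal i 0) : Int)
        if a > s.1 then (a, s.2) else if a < s.2 then (s.1, a) else s)
      (count, count)
  PySem.Int.truncdiv s.1 s.2

-- ===== PORT B =====
def solution_4_1_alt (orisinal : List Int) : Int :=
  let freq := orisinal.foldl (fun d x => d.insert x (d.getD x 0 + 1)) (PySem.Dict.empty : PySem.Dict Int Int)
  let counts := freq.values
  PySem.Int.floordiv ((PySem.List.max? counts (fun y => y)).getD 0)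
                     ((PySem.List.min? counts (fun y => y)).getD 0)

-- ===== PRECONDITION & SPEC =====
-- Pre_ excludes only the empty list, on which A raises IndexError (orisinal[0]).
def Pre_solution_4_1 (orisinal : List Int) : Prop := orisinal ≠ []
instance (orisinal : List Int) : Decidable (Pre_solution_4_1 orisinal) := by unfold Pre_solution_4_1; infer_instance

def pvWitness_solution_4_1 : List Int := [1, 2, 2, 3, 3, 3]

def Spec_solution_4_1 (orisinal : List Int) (out : Int) : Prop := out = solution_4_1_alt orisinal
instance (orisinal : List Int) (out : Int) : Decidable (Spec_solution_4_1 orisinal out) := by unfold Spec_solution_4_1; infer_instance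

-- ===== CLAIM (what is proved, stated in full; the proofs are below) =====
def Claim_equal_solution_4_1 : Prop := ∀ (orisinal : List Int), Dom_solution_4_1 orisinal → Pre_solution_4_1 orisinal → Spec_solution_4_1 orisinal (solution_4_1 orisinal)

-- ===== LEMMAS AND PROOFS =====

-- A's if/elif loop body is a simultaneous running max / running min (given min ≤ max).
theorem pairfold_eq (c : Int → Int) : ∀ (xs : List Int) (mx mn : Int), mn ≤ mx →
    xs.foldl (fun (s : Int × Int) x =>
        let a := c x
        if a > s.1 then (a, s.2) else if a < s.2 then (s.1, a) else s) (mx, mn)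
      = (xs.foldl (fun m x => max m (c x)) mx, xs.foldl (fun m x => min m (c x)) mn) := by
  intro xs
  induction xs with
  | nil => intro mx mn _; rfl
  | cons y ys ih =>
      intro mx mn h
      simp only [List.foldl_cons]
      by_cases h1 : c y > mx
      · have hmax : max mx (c y) = c y := by omega
        have hmin : min mn (c y) = mn := by omega
        simp only [if_pos h1, hmax, hmin]
        exact ih (c y) mn (by omega)
      · by_cases h2 : c y < mn
        · have hmax : max mx (c y) = mx := by omega
          have hmin : min mn (c y) = c y := by omega
          simp only [if_neg h1, if_pos h2, hmax, hmin]
          exact ih mx (c y) (by omega)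
        · have hmax : max mx (c y) = mx := by omega
          have hmin : min mn (c y) = mn := by omega
          simp only [if_neg h1, if_neg h2, hmax, hmin]
          exact ih mx mn h

-- indices 1..len-1 select exactly the tail
theorem map_pyGetD_tail (x : Int) (t : List Int) :
    (PySem.List.pyRange 1 (PySem.List.len (x :: t))).map (fun i => PySem.List.pyGetD (x :: t) i 0) = t := by
  have h0 := PySem.List.map_pyGetD_pyRange_zero (x :: t) 0
  have hlt : (0 : Int) < PySem.List.len (x :: t) := by
    simp only [PySem.List.len, List.length_cons]
    omega
  rw [PySem.List.pyRange_one_cons hlt] at h0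
  simp only [List.map_cons, zero_add] at h0
  exact (List.cons.injEq _ _ _ _).mp h0 |>.2

-- running max over two lists with the same "support relative to the seed"
theorem foldl_max_congr (a : Int) (xs ys : List Int)
    (hxy : ∀ v ∈ xs, v = a ∨ v ∈ ys) (hyx : ∀ v ∈ ys, v = a ∨ v ∈ xs) :
    xs.foldl max a = ys.foldl max a := by
  apply le_antisymm
  · rcases PySem.List.foldl_max_mem xs a with h | h
    · rw [h]; exact (PySem.List.le_foldl_max ys a).1
    · rcases hxy _ h with he | hm
      · rw [he]; exact (PySem.List.le_foldl_max ys a).1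
      · exact (PySem.List.le_foldl_max ys a).2 _ hm
  · rcases PySem.List.foldl_max_mem ys a with h | h
    · rw [h]; exact (PySem.List.le_foldl_max xs a).1
    · rcases hyx _ h with he | hm
      · rw [he]; exact (PySem.List.le_foldl_max xs a).1
      · exact (PySem.List.le_foldl_max xs a).2 _ hm

theorem foldl_min_congr (a : Int) (xs ys : List Int)
    (hxy : ∀ v ∈ xs, v = a ∨ v ∈ ys) (hyx : ∀ v ∈ ys, v = a ∨ v ∈ xs) :
    xs.foldl min a = ys.foldl min a := by
  apply le_antisymm
  · rcases PySem.List.foldl_min_mem ys a with h | h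
    · rw [h]; exact (PySem.List.foldl_min_le xs a).1
    · rcases hyx _ h with he | hm
      · rw [he]; exact (PySem.List.foldl_min_le xs a).1
      · exact (PySem.List.foldl_min_le xs a).2 _ hm
  · rcases PySem.List.foldl_min_mem xs a with h | h
    · rw [h]; exact (PySem.List.foldl_min_le ys a).1
    · rcases hxy _ h with he | hm
      · rw [he]; exact (PySem.List.foldl_min_le ys a).1
      · exact (PySem.List.foldl_min_le ys a).2 _ hm

-- Set.ofList of a cons keeps the head in front
theorem foldl_add_prefix {α : Type} [BEq α] : ∀ (t : List α) (s : PySem.Set α), ∃ r, t.foldl PySem.Set.add s = s ++ r := by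
  intro t
  induction t with
  | nil => intro s; exact ⟨[], by simp⟩
  | cons y ys ih =>
      intro s
      simp only [List.foldl_cons]
      rcases ih (PySem.Set.add s y) with ⟨r, hr⟩
      by_cases h : List.contains s y = true
      · have hadd : PySem.Set.add s y = s := by simp [PySem.Set.add, PySem.Set.contains, h]
        exact ⟨r, by rw [hr, hadd]⟩
      · have hadd : PySem.Set.add s y = s ++ [y] := by simp [PySem.Set.add, PySem.Set.contains, h]
        exact ⟨y :: r, by rw [hr, hadd, List.append_assoc]; rfl⟩

theorem ofList_cons {α : Type} [BEq α] (x : α) (t : List α) :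
    ∃ r, PySem.Set.ofList (x :: t) = x :: r := by
  rw [PySem.Set.ofList_eq_foldl]
  simp only [List.foldl_cons]
  rcases foldl_add_prefix t (PySem.Set.add [] x) with ⟨r, hr⟩
  exact ⟨r, by simpa [PySem.Set.add, PySem.Set.contains] using hr⟩

-- ===== VERDICT (by name: the statement is the Claim_ definition above) =====
theorem solution_4_1_spec : Claim_equal_solution_4_1 := by
  intro l _ hp
  unfold Spec_solution_4_1 Pre_solution_4_1 at *
  obtain ⟨x, t, rfl⟩ := List.exists_cons_of_ne_nil hp
  -- names: l is x :: t throughout; cnt v abbreviates the count of v in l as an Int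
  have hget0 : PySem.List.pyGetD (x :: t) 0 0 = x := by
    simp [PySem.List.pyGetD, PySem.List.pyIdx?, PySem.List.pyGet?]
  have hmapt := map_pyGetD_tail x t
  -- ==== evaluate A to running max / min over the counts of all positions ====
  have hpair :
      (PySem.List.pyRange 1 (PySem.List.len (x :: t))).foldl
        (fun (s : Int × Int) i =>
          if ((List.count (PySem.List.pyGetD (x :: t) i 0) (x :: t) : Int)) > s.1 then
            ((List.count (PySem.List.pyGetD (x :: t) i 0) (x :: t) : Int), s.2)
          else if ((List.count (PySem.List.pyGetD (x :: t) i 0) (x :: t) : Int)) < s.2 then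
            (s.1, (List.count (PySem.List.pyGetD (x :: t) i 0) (x :: t) : Int))
          else s)
        ((List.count x (x :: t) : Int), (List.count x (x :: t) : Int))
      = ((PySem.List.pyRange 1 (PySem.List.len (x :: t))).foldl
           (fun m i => max m ((List.count (PySem.List.pyGetD (x :: t) i 0) (x :: t) : Int)))
           ((List.count x (x :: t) : Int)),
         (PySem.List.pyRange 1 (PySem.List.len (x :: t))).foldl
           (fun m i => min m ((List.count (PySem.List.pyGetD (x :: t) i 0) (x :: t) : Int)))
           ((List.count x (x :: t) : Int))) :=
    pairfold_eq (fun i => (List.count (PySem.List.pyGetD (x :: t) i 0) (x :: t) : Int)) _ _ _ le_rfl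
  have hmaxA :
      (PySem.List.pyRange 1 (PySem.List.len (x :: t))).foldl
        (fun m i => max m ((List.count (PySem.List.pyGetD (x :: t) i 0) (x :: t) : Int)))
        ((List.count x (x :: t) : Int))
      = (t.map (fun y => (List.count y (x :: t) : Int))).foldl max ((List.count x (x :: t) : Int)) := by
    rw [← List.foldl_map (f := fun i => PySem.List.pyGetD (x :: t) i 0)
          (g := fun m v => max m ((List.count v (x :: t) : Int)))
          (l := PySem.List.pyRange 1 (PySem.List.len (x :: t))) (init := ((List.count x (x :: t) : Int))), hmapt, List.foldl_map]
  have hminA :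
      (PySem.List.pyRange 1 (PySem.List.len (x :: t))).foldl
        (fun m i => min m ((List.count (PySem.List.pyGetD (x :: t) i 0) (x :: t) : Int)))
        ((List.count x (x :: t) : Int))
      = (t.map (fun y => (List.count y (x :: t) : Int))).foldl min ((List.count x (x :: t) : Int)) := by
    rw [← List.foldl_map (f := fun i => PySem.List.pyGetD (x :: t) i 0)
          (g := fun m v => min m ((List.count v (x :: t) : Int)))
          (l := PySem.List.pyRange 1 (PySem.List.len (x :: t))) (init := ((List.count x (x :: t) : Int))), hmapt, List.foldl_map]
  have hA : solution_4_1 (x :: t) =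
      PySem.Int.truncdiv
        ((t.map (fun y => (List.count y (x :: t) : Int))).foldl max ((List.count x (x :: t) : Int)))
        ((t.map (fun y => (List.count y (x :: t) : Int))).foldl min ((List.count x (x :: t) : Int))) := by
    show PySem.Int.truncdiv
        ((PySem.List.pyRange 1 (PySem.List.len (x :: t))).foldl
          (fun (s : Int × Int) i =>
            if ((List.count (PySem.List.pyGetD (x :: t) i 0) (x :: t) : Int)) > s.1 then
              ((List.count (PySem.List.pyGetD (x :: t) i 0) (x :: t) : Int), s.2)
            else if ((List.count (PySem.List.pyGetD (x :: t) i 0) (x :: t) : Int)) < s.2 then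
              (s.1, (List.count (PySem.List.pyGetD (x :: t) i 0) (x :: t) : Int))
            else s)
          ((List.count (PySem.List.pyGetD (x :: t) 0 0) (x :: t) : Int),
           (List.count (PySem.List.pyGetD (x :: t) 0 0) (x :: t) : Int))).1
        ((PySem.List.pyRange 1 (PySem.List.len (x :: t))).foldl
          (fun (s : Int × Int) i =>
            if ((List.count (PySem.List.pyGetD (x :: t) i 0) (x :: t) : Int)) > s.1 then
              ((List.count (PySem.List.pyGetD (x :: t) i 0) (x :: t) : Int), s.2)
            else if ((List.count (PySem.List.pyGetD (x :: t) i 0) (x :: t) : Int)) < s.2 then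
              (s.1, (List.count (PySem.List.pyGetD (x :: t) i 0) (x :: t) : Int))
            else s)
          ((List.count (PySem.List.pyGetD (x :: t) 0 0) (x :: t) : Int),
           (List.count (PySem.List.pyGetD (x :: t) 0 0) (x :: t) : Int))).2 = _
    rw [hget0, hpair, hmaxA, hminA]
  -- ==== evaluate B to running max / min over the counts of the distinct elements ====
  obtain ⟨r, hr⟩ := ofList_cons x t
  have hB : solution_4_1_alt (x :: t) =
      PySem.Int.floordiv
        ((r.map (fun y => (List.count y (x :: t) : Int))).foldl max ((List.count x (x :: t) : Int)))
        ((r.map (fun y => (List.count y (x :: t) : Int))).foldl min ((List.count x (x :: t) : Int))) := by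
    show PySem.Int.floordiv
        ((PySem.List.max? (PySem.Dict.counter (x :: t)).values (fun y => y)).getD 0)
        ((PySem.List.min? (PySem.Dict.counter (x :: t)).values (fun y => y)).getD 0) = _
    have hv : (PySem.Dict.counter (x :: t)).values
        = (PySem.Set.ofList (x :: t)).map (fun k => (List.count k (x :: t) : Int)) := by
      simp only [PySem.Dict.values, PySem.Dict.items_counter, List.map_map]
      rfl
    rw [hv, hr]
    simp only [List.map_cons, PySem.List.max?_id_cons, PySem.List.min?_id_cons, Option.getD_some]
  -- ==== the two folds agree: same values relative to the seed (the head element) ====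
  have hxy : ∀ v ∈ t.map (fun y => (List.count y (x :: t) : Int)),
      v = (List.count x (x :: t) : Int) ∨ v ∈ r.map (fun y => (List.count y (x :: t) : Int)) := by
    intro v hv
    obtain ⟨k, hk, rfl⟩ := List.mem_map.mp hv
    have hks : k ∈ PySem.Set.ofList (x :: t) :=
      (PySem.Set.mem_ofList _ k).mpr (List.mem_cons_of_mem _ hk)
    rw [hr] at hks
    rcases List.mem_cons.mp hks with rfl | h
    · left; rfl
    · right; exact List.mem_map.mpr ⟨k, h, rfl⟩
  have hyx : ∀ v ∈ r.map (fun y => (List.count y (x :: t) : Int)),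
      v = (List.count x (x :: t) : Int) ∨ v ∈ t.map (fun y => (List.count y (x :: t) : Int)) := by
    intro v hv
    obtain ⟨k, hk, rfl⟩ := List.mem_map.mp hv
    have hkl : k ∈ (x :: t) := by
      have : k ∈ PySem.Set.ofList (x :: t) := by rw [hr]; exact List.mem_cons_of_mem _ hk
      exact (PySem.Set.mem_ofList _ k).mp this
    rcases List.mem_cons.mp hkl with rfl | h
    · left; rfl
    · right; exact List.mem_map.mpr ⟨k, h, rfl⟩
  have hmax := foldl_max_congr ((List.count x (x :: t) : Int)) _ _ hxy hyx
  have hmin := foldl_min_congr ((List.count x (x :: t) : Int)) _ _ hxy hyx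
  -- ==== positivity: every count that appears is ≥ 1, so int(max/min) = max // min ====
  have hcx : (1 : Int) ≤ (List.count x (x :: t) : Int) := by
    have : 0 < List.count x (x :: t) := List.count_pos_iff.mpr List.mem_cons_self
    exact_mod_cast this
  have hcmem : ∀ v ∈ t.map (fun y => (List.count y (x :: t) : Int)), (1 : Int) ≤ v := by
    intro v hv
    obtain ⟨k, hk, rfl⟩ := List.mem_map.mp hv
    have : 0 < List.count k (x :: t) := List.count_pos_iff.mpr (List.mem_cons_of_mem _ hk)
    exact_mod_cast this
  have hmn1 : (1 : Int) ≤ (t.map (fun y => (List.count y (x :: t) : Int))).foldl min ((List.count x (x :: t) : Int)) := by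
    rcases PySem.List.foldl_min_mem (t.map (fun y => (List.count y (x :: t) : Int))) ((List.count x (x :: t) : Int)) with h | h
    · rw [h]; exact hcx
    · exact hcmem _ h
  have hmxmn := le_trans
    (PySem.List.foldl_min_le (t.map (fun y => (List.count y (x :: t) : Int))) ((List.count x (x :: t) : Int))).1
    (PySem.List.le_foldl_max (t.map (fun y => (List.count y (x :: t) : Int))) ((List.count x (x :: t) : Int))).1
  rw [hA, hB, ← hmax, ← hmin]
  rw [PySem.Int.floordiv_eq_ediv_of_pos (by omega)]
  exact Int.tdiv_eq_ediv_of_nonneg (by omega)
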